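-- pv_equiv track=rewrite | github.com/aleahfaa/Individual-Projects | Devcode Weekly Challenge/#3 - 鬼滅の刃 (Demon Slayer)/case3.py | seranganHinokamiKagura
-- ===== SOURCE A (Python) =====
-- def seranganHinokamiKagura(nyawaIblis):
--     total_damage = 0
--     serangan_ke = 0
--     while total_damage < nyawaIblis and serangan_ke < 13:
--         serangan_ke += 1
--         total_damage += serangan_ke
--     if total_damage >= nyawaIblis:
--         return f'Iblis Kalah pada Serangan ke-{serangan_ke}'
--     else:
--         sisa_hp = nyawaIblis - total_damage
--         return f'Sisa HP Iblis {sisa_hp}'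
-- ===== SOURCE B (Python) =====
-- def seranganHinokamiKagura(nyawaIblis):
--     if nyawaIblis <= 0:
--         return 'Iblis Kalah pada Serangan ke-0'
--     if nyawaIblis > 91:
--         return f'Sisa HP Iblis {nyawaIblis - 91}'
--     lo, hi = 1, 13
--     while lo < hi:
--         mid = (lo + hi) // 2
--         if mid * (mid + 1) // 2 >= nyawaIblis:
--             hi = mid
--         else:
--             lo = mid + 1
--     return f'Iblis Kalah pada Serangan ke-{lo}'
-- ===== Notes on version B (the rewrite author's own statement) =====
-- stated objective: alternative
-- what changed: Replaces the linear attack-by-attack simulation with explicit edge cases (HP<=0 gives attack 0, HP>91 leaves remaining HP) plus a binary search over 1..13 for the smallest attack whose triangular-number damage reaches the HP.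
import Mathlib
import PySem

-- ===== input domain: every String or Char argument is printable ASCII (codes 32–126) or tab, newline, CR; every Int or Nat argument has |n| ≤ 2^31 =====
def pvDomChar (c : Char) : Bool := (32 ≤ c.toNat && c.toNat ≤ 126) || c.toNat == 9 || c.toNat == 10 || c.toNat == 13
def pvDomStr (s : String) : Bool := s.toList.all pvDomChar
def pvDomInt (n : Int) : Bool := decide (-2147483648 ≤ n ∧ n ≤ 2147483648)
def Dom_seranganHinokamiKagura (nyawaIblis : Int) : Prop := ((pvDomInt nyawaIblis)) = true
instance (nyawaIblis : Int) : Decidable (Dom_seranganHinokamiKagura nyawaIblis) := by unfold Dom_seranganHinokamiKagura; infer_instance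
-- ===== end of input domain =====

-- B replaces A's attack-by-attack simulation by edge-case branches plus a binary search
-- over 1..13 for the first attack whose cumulative damage reaches the HP (alternative, not faster).

-- ===== PORT A =====
-- the while loop of A: state (total_damage, serangan_ke)
def pvALoop (n total k : Int) : Int × Int :=
  if h : total < n ∧ k < 13 then pvALoop n (total + (k + 1)) (k + 1) else (total, k)
termination_by (13 - k).toNat
decreasing_by omega

def seranganHinokamiKagura (nyawaIblis : Int) : String :=
  let r := pvALoop nyawaIblis 0 0
  if r.1 ≥ nyawaIblis then
    "Iblis Kalah pada Serangan ke-" ++ PySem.Int.toStr r.2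
  else
    "Sisa HP Iblis " ++ PySem.Int.toStr (nyawaIblis - r.1)

-- ===== PORT B =====
-- the binary-search while loop of Source B: state (lo, hi)
def pvBSearch (n lo hi : Int) (hle : lo ≤ hi) : Int :=
  if h : lo < hi then
    let mid := PySem.Int.floordiv (lo + hi) 2
    if PySem.Int.floordiv (mid * (mid + 1)) 2 ≥ n then
      pvBSearch n lo mid (PySem.Int.floordiv_two_mid_bounds hle).1
    else
      pvBSearch n (mid + 1) hi (by
        have := (PySem.Int.floordiv_two_mid_bounds (le_of_lt h)).2
        have hlt : PySem.Int.floordiv (lo + hi) 2 < hi := by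
          have h2 : (0:Int) < 2 := by norm_num
          have := (PySem.Int.floordiv_lt_iff_lt_mul (a := lo + hi) (b := 2) (q := hi) h2).2 (by omega)
          exact this
        omega)
  else lo
termination_by (hi - lo).toNat
decreasing_by
  · have h2 : (0:Int) < 2 := by norm_num
    have := (PySem.Int.floordiv_lt_iff_lt_mul (a := lo + hi) (b := 2) (q := hi) h2).2 (by omega)
    omega
  · have := (PySem.Int.floordiv_two_mid_bounds (le_of_lt h)).1
    omega

def seranganHinokamiKagura_alt (nyawaIblis : Int) : String :=
  if nyawaIblis ≤ 0 then
    "Iblis Kalah pada Serangan ke-0"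
  else if nyawaIblis > 91 then
    "Sisa HP Iblis " ++ PySem.Int.toStr (nyawaIblis - 91)
  else
    "Iblis Kalah pada Serangan ke-" ++ PySem.Int.toStr (pvBSearch nyawaIblis 1 13 (by norm_num))

-- ===== PRECONDITION & SPEC =====
def Spec_seranganHinokamiKagura (nyawaIblis : Int) (out : String) : Prop := out = seranganHinokamiKagura_alt nyawaIblis
instance (nyawaIblis : Int) (out : String) : Decidable (Spec_seranganHinokamiKagura nyawaIblis out) := by unfold Spec_seranganHinokamiKagura; infer_instance

-- ===== CLAIM (what is proved, stated in full; the proofs are below) =====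
def Claim_equal_seranganHinokamiKagura : Prop := ∀ (nyawaIblis : Int), Dom_seranganHinokamiKagura nyawaIblis → Spec_seranganHinokamiKagura nyawaIblis (seranganHinokamiKagura nyawaIblis)

-- ===== LEMMAS AND PROOFS =====
lemma pvALoop_step (n total k : Int) (h1 : total < n) (h2 : k < 13) :
    pvALoop n total k = pvALoop n (total + (k + 1)) (k + 1) := by
  rw [pvALoop]; simp [h1, h2]

lemma pvALoop_stop (n total k : Int) (h : ¬ (total < n ∧ k < 13)) :
    pvALoop n total k = (total, k) := by
  rw [pvALoop]; simp only [dif_neg h]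

lemma pvALoop_nonpos (n : Int) (h : n ≤ 0) : pvALoop n 0 0 = (0, 0) :=
  pvALoop_stop n 0 0 (by omega)

lemma pvALoop_big (n : Int) (h : 91 < n) : pvALoop n 0 0 = (91, 13) := by
  rw [pvALoop_step n 0 0 (by omega) (by omega)]; norm_num
  rw [pvALoop_step n 1 1 (by omega) (by omega)]; norm_num
  rw [pvALoop_step n 3 2 (by omega) (by omega)]; norm_num
  rw [pvALoop_step n 6 3 (by omega) (by omega)]; norm_num
  rw [pvALoop_step n 10 4 (by omega) (by omega)]; norm_num
  rw [pvALoop_step n 15 5 (by omega) (by omega)]; norm_num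
  rw [pvALoop_step n 21 6 (by omega) (by omega)]; norm_num
  rw [pvALoop_step n 28 7 (by omega) (by omega)]; norm_num
  rw [pvALoop_step n 36 8 (by omega) (by omega)]; norm_num
  rw [pvALoop_step n 45 9 (by omega) (by omega)]; norm_num
  rw [pvALoop_step n 55 10 (by omega) (by omega)]; norm_num
  rw [pvALoop_step n 66 11 (by omega) (by omega)]; norm_num
  rw [pvALoop_step n 78 12 (by omega) (by omega)]; norm_num
  exact pvALoop_stop n 91 13 (by omega)

-- ===== VERDICT (by name: the statement is the Claim_ definition above) =====
theorem seranganHinokamiKagura_spec : Claim_equal_seranganHinokamiKagura := by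
  intro n _
  unfold Spec_seranganHinokamiKagura
  by_cases h0 : n ≤ 0
  · unfold seranganHinokamiKagura seranganHinokamiKagura_alt
    rw [pvALoop_nonpos n h0]
    rw [if_pos (by omega), if_pos h0]
    decide
  · by_cases hb : 91 < n
    · unfold seranganHinokamiKagura seranganHinokamiKagura_alt
      rw [pvALoop_big n hb]
      simp only []
      rw [if_neg (by omega), if_neg (by omega), if_pos (by omega)]
    · -- 1 ≤ n ≤ 91: finitely many cases
      have h1 : 1 ≤ n := by omega
      have h2 : n ≤ 91 := by omega
      interval_cases n <;>
        simp [seranganHinokamiKagura, seranganHinokamiKagura_alt, pvALoop, pvBSearch,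
              PySem.Int.floordiv]
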